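-- pv_equiv track=rewrite | github.com/boris-kz/CogAlg | frame_blobs.py | lateral_comp
-- ===== SOURCE A (Python) =====
-- from collections import deque
--
-- def lateral_comp(pixel_):
--     " Comparison over x coordinate, within rng of consecutive pixels on each line "
--
--     dert1_ = []  # tuples of complete 1D derivatives: summation range = rng
--     rng_dert1_ = deque(maxlen=rng)  # incomplete dert1s, within rng from input pixel: summation range < rng
--     rng_dert1_.append((0, 0))
--
--     for x, p in enumerate(pixel_):  # pixel p is compared to rng of prior pixels within horizontal line, summing d per prior pixel
--         back_d = 0
--         for index, (pri_p, d) in enumerate(rng_dert1_):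
--             id = p - pri_p
--             d += id
--             back_d += id
--             if index < max_index:
--                 rng_dert1_[index] = (pri_p, d)
--             elif x > min_coord:  # after pri_p comp over rng
--                 dert1_.append((pri_p, d))  # completed bilateral tuple is transferred from rng_dert_ to dert_
--
--         rng_dert1_.appendleft((p, back_d))
--     # last incomplete rng_dert1_ in line are discarded, vs. dert1_ += reversed(rng_dert1_)
--     return dert1_
--
-- rng = 1  # number of pixels compared to each pixel in four directions
--
-- max_index = rng - 1  # max index of rng_dert1_ and rng_dert2_
--
-- min_coord = rng * 2 - 1  # min x and y for form_P input: der2 from comp over rng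
-- ===== SOURCE B (Python) =====
-- def lateral_comp(pixel_):
--     "Comparison over x coordinate, within rng of consecutive pixels on each line"
--     # rng = 1: the running comparison collapses to a central difference
--     return [(p, nxt - prv) for prv, p, nxt in zip(pixel_, pixel_[1:], pixel_[2:])]
-- ===== Notes on version B (the rewrite author's own statement) =====
-- stated objective: simpler
-- what changed: Replaced the deque of incomplete derivative tuples and the nested enumerate loop with a single central-difference comprehension over zipped adjacent triples, exploiting rng=1.
import Mathlib
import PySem

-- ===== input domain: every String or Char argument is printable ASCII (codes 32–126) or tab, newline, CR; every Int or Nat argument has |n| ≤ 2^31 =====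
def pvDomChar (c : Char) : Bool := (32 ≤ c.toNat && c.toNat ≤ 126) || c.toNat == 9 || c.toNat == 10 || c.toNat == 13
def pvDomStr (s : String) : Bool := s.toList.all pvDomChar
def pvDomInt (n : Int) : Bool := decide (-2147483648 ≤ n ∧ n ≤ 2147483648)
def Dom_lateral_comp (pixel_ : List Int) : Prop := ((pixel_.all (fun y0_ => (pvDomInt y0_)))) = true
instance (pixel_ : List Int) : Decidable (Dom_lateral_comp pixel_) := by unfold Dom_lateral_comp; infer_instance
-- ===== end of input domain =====

-- B replaces A's deque of incomplete tuples and nested loop by a single central-difference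
-- comprehension over zipped adjacent triples (valid because rng = 1); objective: simpler.

-- ===== PORT A =====
def pvRng : Nat := 1                       -- rng = 1
def pvMaxIndex : Int := (pvRng : Int) - 1  -- max_index = rng - 1
def pvMinCoord : Int := (pvRng : Int) * 2 - 1  -- min_coord = rng * 2 - 1

-- inner loop body: state = (rng_dert1_, dert1_, back_d), element = (index, (pri_p, d))
def pvInner (p x : Int) (st : List (Int × Int) × List (Int × Int) × Int)
    (e : Int × Int × Int) : List (Int × Int) × List (Int × Int) × Int :=
  let (rngd, dert, back_d) := st
  let (index, pri_p, d) := e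
  let id := p - pri_p
  let d := d + id
  let back_d := back_d + id
  if index < pvMaxIndex then
    (rngd.set index.toNat (pri_p, d), dert, back_d)   -- index here is a valid Nat position
  else if x > pvMinCoord then
    (rngd, dert ++ [(pri_p, d)], back_d)
  else
    (rngd, dert, back_d)

-- outer loop body: state = (dert1_, rng_dert1_); appendleft on a maxlen-1 deque keeps 1 element
def pvOuter (st : List (Int × Int) × List (Int × Int)) (e : Int × Int) :
    List (Int × Int) × List (Int × Int) :=
  let (dert, rngd) := st
  let (x, p) := e
  let r := (PySem.List.enumerate rngd).foldl (pvInner p x) (rngd, dert, 0)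
  (r.2.1, ((p, r.2.2) :: r.1).take pvRng)

def lateral_comp (pixel_ : List Int) : List (Int × Int) :=
  ((PySem.List.enumerate pixel_).foldl pvOuter ([], [(0, 0)])).1

-- ===== PORT B =====
def lateral_comp_alt (pixel_ : List Int) : List (Int × Int) :=
  ((pixel_.zip (pixel_.drop 1)).zip (pixel_.drop 2)).map
    (fun t => (t.1.2, t.2 - t.1.1))

-- ===== PRECONDITION & SPEC =====
def Spec_lateral_comp (pixel_ : List Int) (out : List (Int × Int)) : Prop := out = lateral_comp_alt pixel_
instance (pixel_ : List Int) (out : List (Int × Int)) : Decidable (Spec_lateral_comp pixel_ out) := by unfold Spec_lateral_comp; infer_instance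

-- ===== CLAIM (what is proved, stated in full; the proofs are below) =====
def Claim_equal_lateral_comp : Prop := ∀ (pixel_ : List Int), Dom_lateral_comp pixel_ → Spec_lateral_comp pixel_ (lateral_comp pixel_)

-- ===== LEMMAS AND PROOFS =====

-- closed form of the main loop once x ≥ 2: each step emits (q, d + (p - q)) and the
-- singleton deque becomes [(p, p - q)]
def pvAux (q d : Int) : List Int → List (Int × Int)
  | [] => []
  | p :: rest => (q, d + (p - q)) :: pvAux p (p - q) rest

def pvDeq (q d : Int) : List Int → List (Int × Int)
  | [] => [(q, d)]
  | p :: rest => pvDeq p (p - q) rest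

lemma pvOuter_step (dert : List (Int × Int)) (q d x p : Int) (hx : x > 1) :
    pvOuter (dert, [(q, d)]) (x, p) = (dert ++ [(q, d + (p - q))], [(p, p - q)]) := by
  simp [pvOuter, pvInner, PySem.List.enumerate, pvMaxIndex, pvMinCoord, pvRng, hx]

lemma pvLoop (rest : List Int) (x : Int) (dert : List (Int × Int)) (q d : Int)
    (hx : 2 ≤ x) :
    (PySem.List.enumerate rest x).foldl pvOuter (dert, [(q, d)]) =
      (dert ++ pvAux q d rest, pvDeq q d rest) := by
  induction rest generalizing x dert q d with
  | nil => simp [PySem.List.enumerate, pvAux, pvDeq]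
  | cons p rest ih =>
    rw [PySem.List.enumerate_cons, List.foldl_cons,
        pvOuter_step dert q d x p (by omega),
        ih (x + 1) _ p (p - q) (by omega)]
    simp [pvAux, pvDeq]

lemma pvAux_eq (rest : List Int) : ∀ a b : Int,
    pvAux b (b - a) rest =
      (((a :: b :: rest).zip ((a :: b :: rest).drop 1)).zip ((a :: b :: rest).drop 2)).map
        (fun t => (t.1.2, t.2 - t.1.1)) := by
  induction rest with
  | nil => intro a b; simp [pvAux]
  | cons c rest ih =>
    intro a b
    have h := ih b c
    simp only [List.drop, List.zip_cons_cons, List.map_cons, pvAux] at h ⊢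
    rw [h]
    congr 2
    ring

-- ===== VERDICT (by name: the statement is the Claim_ definition above) =====
theorem lateral_comp_spec : Claim_equal_lateral_comp := by
  intro pixel_ _
  unfold Spec_lateral_comp lateral_comp lateral_comp_alt
  match pixel_ with
  | [] => rfl
  | [a] => simp [PySem.List.enumerate, pvOuter, pvInner, pvMaxIndex, pvMinCoord, pvRng]
  | a :: b :: rest =>
    rw [PySem.List.enumerate_cons, PySem.List.enumerate_cons, List.foldl_cons, List.foldl_cons]
    have h0 : pvOuter ([], [(0, 0)]) (0, a) = ([], [(a, a)]) := by
      simp [pvOuter, pvInner, PySem.List.enumerate, pvMaxIndex, pvMinCoord, pvRng]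
    have h1 : pvOuter ([], [(a, a)]) (0 + 1, b) = ([], [(b, b - a)]) := by
      simp [pvOuter, pvInner, PySem.List.enumerate, pvMaxIndex, pvMinCoord, pvRng]
    rw [h0, h1, pvLoop rest (0 + 1 + 1) [] b (b - a) (by omega)]
    simpa using pvAux_eq rest a b
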